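-- pv_equiv track=rewrite | github.com/BerBai/codedb | HW/【DFS-BFS】2024E-树状结构查询.py | bfs
-- ===== SOURCE A (Python) =====
-- from collections import deque
--
-- def bfs(query, node_map):
--     queue = deque(query)
--     ans = []
--     while queue:
--         cur = queue.popleft()
--         if cur not in node_map:
--             continue
--         for node in node_map[cur]:
--             ans.append(node)
--             queue.append(node)
--     return ans
-- ===== SOURCE B (Python) =====
-- def bfs(query, node_map):
--     # Level-synchronous BFS: process one whole frontier at a time instead of a deque.
--     ans = []
--     frontier = list(query)
--     while frontier:
--         next_frontier = []
--         for node in frontier: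
--             if node in node_map:
--                 for child in node_map[node]:
--                     ans.append(child)
--                     next_frontier.append(child)
--         frontier = next_frontier
--     return ans
-- ===== Notes on version B (the rewrite author's own statement) =====
-- stated objective: alternative
-- what changed: Replaced the single deque/popleft loop by a level-synchronous BFS: an outer while over non-empty frontiers with an inner loop appending each node's children to both ans and the next frontier, reproducing the same FIFO output order without a queue.
import Mathlib
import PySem

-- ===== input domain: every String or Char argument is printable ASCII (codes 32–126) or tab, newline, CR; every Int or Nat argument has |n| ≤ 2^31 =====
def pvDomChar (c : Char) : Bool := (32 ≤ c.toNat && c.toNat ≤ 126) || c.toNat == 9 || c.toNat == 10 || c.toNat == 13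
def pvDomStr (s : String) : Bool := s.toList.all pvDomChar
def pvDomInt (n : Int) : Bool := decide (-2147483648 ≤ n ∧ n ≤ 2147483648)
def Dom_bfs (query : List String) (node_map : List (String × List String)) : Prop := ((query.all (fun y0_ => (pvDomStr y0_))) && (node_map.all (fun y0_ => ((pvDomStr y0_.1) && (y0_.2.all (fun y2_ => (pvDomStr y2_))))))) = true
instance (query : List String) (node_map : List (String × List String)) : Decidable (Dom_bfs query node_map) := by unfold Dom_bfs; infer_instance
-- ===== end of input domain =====

-- B replaces A's single deque/popleft loop by a level-synchronous BFS over whole frontiers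
-- (same cost, different decomposition; objective: alternative).

-- ===== PORT A =====
-- Python dict membership + indexing: first-match lookup in the association list
def pvGetChildren (node_map : List (String × List String)) (cur : String) : Option (List String) :=
  match node_map with
  | [] => none
  | (k, v) :: rest => if k == cur then some v else pvGetChildren rest cur

-- children of all keys in a list, in order (used only to compute the fuel guard and Pre_)
def pvStep (node_map : List (String × List String)) (f : List String) : List String :=
  f.flatMap (fun n => (pvGetChildren node_map n).getD [])

-- exact number of pops A performs when the expansion dies out within n rounds, plus one
def pvFuel (node_map : List (String × List String)) : Nat → List String → Nat
  | 0, _ => 1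
  | n+1, f => f.length + pvFuel node_map n (pvStep node_map f)

-- A's while-loop; fuel only guards divergence (Pre_bfs guarantees it is never exhausted)
def bfsA_loop (node_map : List (String × List String)) : Nat → List String → List String → List String
  | _, [], ans => ans
  | 0, _ :: _, ans => ans
  | fuel+1, cur :: rest, ans =>
    match pvGetChildren node_map cur with
    | none => bfsA_loop node_map fuel rest ans
    | some cs => bfsA_loop node_map fuel (rest ++ cs) (ans ++ cs)

def bfs (query : List String) (node_map : List (String × List String)) : List String :=
  bfsA_loop node_map (pvFuel node_map (node_map.length + 1) query) query []

-- ===== PORT B =====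
-- B's inner for-loop: one pass over the frontier extending (ans, next_frontier)
def bfsB_inner (node_map : List (String × List String)) (frontier : List String)
    (acc : List String × List String) : List String × List String :=
  frontier.foldl (fun p node =>
    match pvGetChildren node_map node with
    | none => p
    | some cs => (p.1 ++ cs, p.2 ++ cs)) acc

-- B's while-loop over frontiers; fuel only guards divergence (never exhausted under Pre_bfs)
def bfsB_loop (node_map : List (String × List String)) : Nat → List String → List String → List String
  | 0, _, ans => ans
  | fuel+1, frontier, ans =>
    if frontier.isEmpty then ans
    else
      let p := bfsB_inner node_map frontier (ans, [])
      bfsB_loop node_map fuel p.2 p.1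

def bfs_alt (query : List String) (node_map : List (String × List String)) : List String :=
  bfsB_loop node_map (node_map.length + 2) query []

-- ===== PRECONDITION & SPEC =====
def pvIter (node_map : List (String × List String)) : Nat → List String → List String
  | 0, f => f
  | n+1, f => pvIter node_map n (pvStep node_map f)

-- Pre_ excludes exactly the inputs on which A's while-loop never terminates (a cycle of keys
-- reachable from query): by pigeonhole, A's queue empties iff the iterated child-expansion of
-- query dies out within node_map.length + 1 rounds.
def Pre_bfs (query : List String) (node_map : List (String × List String)) : Prop :=
  pvIter node_map (node_map.length + 1) query = []
instance (query : List String) (node_map : List (String × List String)) : Decidable (Pre_bfs query node_map) := by unfold Pre_bfs; infer_instance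

def pvWitness_bfs : List String × (List (String × List String)) := (["a"], [("a", ["b", "c"])])

def Spec_bfs (query : List String) (node_map : List (String × List String)) (out : List String) : Prop := out = bfs_alt query node_map
instance (query : List String) (node_map : List (String × List String)) (out : List String) : Decidable (Spec_bfs query node_map out) := by unfold Spec_bfs; infer_instance

-- ===== CLAIM (what is proved, stated in full; the proofs are below) =====
def Claim_equal_bfs : Prop := ∀ (query : List String) (node_map : List (String × List String)), Dom_bfs query node_map → Pre_bfs query node_map → Spec_bfs query node_map (bfs query node_map)

-- ===== LEMMAS AND PROOFS =====

-- the answer produced once the expansion dies out within n rounds: concatenation of the levels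
def pvAns (node_map : List (String × List String)) : Nat → List String → List String
  | 0, _ => []
  | n+1, f => pvStep node_map f ++ pvAns node_map n (pvStep node_map f)

theorem pvStep_nil (nm : List (String × List String)) : pvStep nm [] = [] := rfl

theorem pvStep_cons (nm : List (String × List String)) (x : String) (f : List String) :
    pvStep nm (x :: f) = (pvGetChildren nm x).getD [] ++ pvStep nm f := by
  simp [pvStep]

theorem pvAns_nil (nm : List (String × List String)) : ∀ n, pvAns nm n [] = []
  | 0 => rfl
  | n+1 => by simp [pvAns, pvStep_nil, pvAns_nil nm n]

-- one whole level of A's queue loop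
theorem bfsA_level (nm : List (String × List String)) :
    ∀ (f nx ans : List String) (fuel : Nat),
      bfsA_loop nm (f.length + fuel) (f ++ nx) ans
        = bfsA_loop nm fuel (nx ++ pvStep nm f) (ans ++ pvStep nm f) := by
  intro f
  induction f with
  | nil => intro nx ans fuel; simp [pvStep_nil]
  | cons x f ih =>
    intro nx ans fuel
    have hlen : (x :: f).length + fuel = (f.length + fuel) + 1 := by simp; omega
    rw [hlen]
    show (match pvGetChildren nm x with
      | none => bfsA_loop nm (f.length + fuel) (f ++ nx) ans
      | some cs => bfsA_loop nm (f.length + fuel) ((f ++ nx) ++ cs) (ans ++ cs))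
      = bfsA_loop nm fuel (nx ++ pvStep nm (x :: f)) (ans ++ pvStep nm (x :: f))
    cases h : pvGetChildren nm x with
    | none => rw [ih nx ans fuel]; simp [pvStep_cons, h]
    | some cs =>
      show bfsA_loop nm (f.length + fuel) ((f ++ nx) ++ cs) (ans ++ cs) = _
      rw [List.append_assoc, ih (nx ++ cs) (ans ++ cs) fuel]
      simp [pvStep_cons, h]

-- A's loop, run to completion with its exact fuel
theorem bfsA_run (nm : List (String × List String)) :
    ∀ (n : Nat) (f ans : List String), pvIter nm n f = [] →
      bfsA_loop nm (pvFuel nm n f) f ans = ans ++ pvAns nm n f := by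
  intro n
  induction n with
  | zero => intro f ans h; simp [pvIter] at h; subst h; simp [pvFuel, pvAns, bfsA_loop]
  | succ n ih =>
    intro f ans h
    have h' : pvIter nm n (pvStep nm f) = [] := h
    have := bfsA_level nm f [] ans (pvFuel nm n (pvStep nm f))
    simp only [List.append_nil, List.nil_append] at this
    calc bfsA_loop nm (pvFuel nm (n+1) f) f ans
        = bfsA_loop nm (f.length + pvFuel nm n (pvStep nm f)) f ans := by rfl
      _ = bfsA_loop nm (pvFuel nm n (pvStep nm f)) (pvStep nm f) (ans ++ pvStep nm f) := this
      _ = (ans ++ pvStep nm f) ++ pvAns nm n (pvStep nm f) := ih _ _ h'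
      _ = ans ++ pvAns nm (n+1) f := by simp [pvAns]

-- B's inner fold appends exactly the level's children to both components
theorem bfsB_inner_eq (nm : List (String × List String)) :
    ∀ (f : List String) (a b : List String),
      bfsB_inner nm f (a, b) = (a ++ pvStep nm f, b ++ pvStep nm f) := by
  intro f
  induction f with
  | nil => intro a b; simp [bfsB_inner, pvStep_nil]
  | cons x f ih =>
    intro a b
    show (List.foldl _ (match pvGetChildren nm x with
      | none => (a, b)
      | some cs => (a ++ cs, b ++ cs)) f) = _
    cases h : pvGetChildren nm x with
    | none =>
      have := ih a b
      simp [bfsB_inner] at this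
      simp [this, pvStep_cons, h]
    | some cs =>
      have := ih (a ++ cs) (b ++ cs)
      simp [bfsB_inner] at this
      simp [this, pvStep_cons, h]

-- B's while-loop, run to completion
theorem bfsB_run (nm : List (String × List String)) :
    ∀ (n : Nat) (f ans : List String), pvIter nm n f = [] →
      bfsB_loop nm (n + 1) f ans = ans ++ pvAns nm n f := by
  intro n
  induction n with
  | zero => intro f ans h; simp [pvIter] at h; subst h; simp [bfsB_loop, pvAns]
  | succ n ih =>
    intro f ans h
    have h' : pvIter nm n (pvStep nm f) = [] := h
    cases f with
    | nil => simp [bfsB_loop, pvAns_nil]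
    | cons x f =>
      have e : bfsB_loop nm (n + 1 + 1) (x :: f) ans
          = bfsB_loop nm (n + 1) (bfsB_inner nm (x :: f) (ans, [])).2 (bfsB_inner nm (x :: f) (ans, [])).1 := rfl
      rw [e, bfsB_inner_eq nm (x :: f) ans []]
      simp only [List.nil_append]
      rw [ih (pvStep nm (x :: f)) (ans ++ pvStep nm (x :: f)) h']
      simp [pvAns]

-- ===== VERDICT (by name: the statement is the Claim_ definition above) =====
theorem bfs_spec : Claim_equal_bfs := by
  intro query nm _ hpre
  unfold Spec_bfs bfs bfs_alt
  rw [bfsA_run nm (nm.length + 1) query [] hpre]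
  rw [show nm.length + 2 = (nm.length + 1) + 1 from rfl,
      bfsB_run nm (nm.length + 1) query [] hpre]
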